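-- pv_equiv track=rewrite | github.com/ChristiaaaaanCurrin/AlgebraicGame | tic_tac_toe.py | generate_column_masks
-- ===== SOURCE A (Python) =====
-- def generate_column_masks(to_win, rows, columns):
--     win_masks = []
--     column_mask = 1
--     for w in range(to_win - 1):
--         column_mask = 1 | (column_mask << columns)
--     for c in range(columns):
--         win_masks.append(column_mask)
--         for r in range(rows - to_win):
--             column_mask = column_mask << columns
--             win_masks.append(column_mask)
--         column_mask = column_mask << 1
--     return win_masks
-- ===== SOURCE B (Python) =====
-- def generate_column_masks(to_win, rows, columns):
--     base = sum(1 << (k * columns) for k in range(max(to_win, 1)))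
--     m = max(rows - to_win, 0)
--     step = m * columns + 1
--     return [base << (c * step + r * columns)
--             for c in range(columns)
--             for r in range(m + 1)]
-- ===== Notes on version B (the rewrite author's own statement) =====
-- stated objective: simpler
-- what changed: A builds each mask by mutating one running accumulator across both loops (never resetting it between columns); B computes the base vertical line mask once and emits every mask by closed-form index arithmetic (base << (c*step + r*columns)) in a single comprehension.
-- outside the precondition, e.g. on generate_column_masks(2, 3, -1): A raises ValueError, B raises ValueError
import Mathlib
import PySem

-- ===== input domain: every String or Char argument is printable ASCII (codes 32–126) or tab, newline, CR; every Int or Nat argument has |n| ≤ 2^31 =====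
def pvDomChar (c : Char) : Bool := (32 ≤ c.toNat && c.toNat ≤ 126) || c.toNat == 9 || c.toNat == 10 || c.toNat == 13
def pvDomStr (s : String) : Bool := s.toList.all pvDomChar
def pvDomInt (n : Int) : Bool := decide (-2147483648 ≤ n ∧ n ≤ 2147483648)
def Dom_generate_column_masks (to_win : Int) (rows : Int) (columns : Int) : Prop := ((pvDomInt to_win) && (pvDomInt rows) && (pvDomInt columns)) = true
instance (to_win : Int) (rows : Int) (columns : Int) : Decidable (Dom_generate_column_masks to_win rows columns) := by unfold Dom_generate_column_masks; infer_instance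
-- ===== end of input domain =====

-- B replaces A's single mutated running mask (carried across both loops) by a
-- closed-form base line mask shifted by per-column/per-row offsets; objective: simpler.

-- Python x << n, exact for 0 ≤ n (Pre_ guarantees every shift amount is nonnegative)
def pvShl (x n : Int) : Int := x * 2 ^ n.toNat

-- ===== PORT A =====
def generate_column_masks (to_win : Int) (rows : Int) (columns : Int) : List Int :=
  let column_mask : Int :=
    (PySem.List.pyRange 0 (to_win - 1) 1).foldl (fun m _ => Int.lor 1 (pvShl m columns)) 1
  ((PySem.List.pyRange 0 columns 1).foldl
    (fun (st : List Int × Int) _ =>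
      let st2 := (PySem.List.pyRange 0 (rows - to_win) 1).foldl
        (fun (s : List Int × Int) _ => (s.1 ++ [pvShl s.2 columns], pvShl s.2 columns))
        (st.1 ++ [st.2], st.2)
      (st2.1, pvShl st2.2 1))
    ([], column_mask)).1

-- ===== PORT B =====
def generate_column_masks_alt (to_win : Int) (rows : Int) (columns : Int) : List Int :=
  let base : Int :=
    ((PySem.List.pyRange 0 (max to_win 1) 1).map (fun k => pvShl 1 (k * columns))).sum
  let m : Int := max (rows - to_win) 0
  let step : Int := m * columns + 1
  (PySem.List.pyRange 0 columns 1).flatMap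
    (fun c => (PySem.List.pyRange 0 (m + 1) 1).map (fun r => pvShl base (c * step + r * columns)))

-- ===== PRECONDITION & SPEC =====
-- Pre_ excludes exactly the inputs where Python A raises ValueError (a negative
-- shift amount: to_win ≥ 2 with columns < 0); Python B raises there as well.
def Pre_generate_column_masks (to_win : Int) (rows : Int) (columns : Int) : Prop :=
  to_win ≤ 1 ∨ 0 ≤ columns
instance (to_win : Int) (rows : Int) (columns : Int) : Decidable (Pre_generate_column_masks to_win rows columns) := by unfold Pre_generate_column_masks; infer_instance

def pvWitness_generate_column_masks : Int × Int × Int := (3, 4, 3)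

def Spec_generate_column_masks (to_win : Int) (rows : Int) (columns : Int) (out : List Int) : Prop := out = generate_column_masks_alt to_win rows columns
instance (to_win : Int) (rows : Int) (columns : Int) (out : List Int) : Decidable (Spec_generate_column_masks to_win rows columns out) := by unfold Spec_generate_column_masks; infer_instance

-- ===== CLAIM (what is proved, stated in full; the proofs are below) =====
def Claim_equal_generate_column_masks : Prop := ∀ (to_win : Int) (rows : Int) (columns : Int), Dom_generate_column_masks to_win rows columns → Pre_generate_column_masks to_win rows columns → Spec_generate_column_masks to_win rows columns (generate_column_masks to_win rows columns)

-- ===== LEMMAS AND PROOFS =====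

-- a fold whose function ignores the elements is an iterate of the length
theorem pv_foldl_const {α β : Type} (g : α → α) (l : List β) (init : α) :
    l.foldl (fun s _ => g s) init = g^[l.length] init := by
  induction l generalizing init with
  | nil => rfl
  | cons x t ih => simp [List.foldl_cons, ih, Function.iterate_succ_apply]

theorem pv_nat_one_lor_even (k : Nat) : (1 : Nat) ||| (2 * k) = 2 * k + 1 := by
  have h := Nat.lor_bit true 0 false k
  simpa [Nat.bit] using h

theorem pv_int_lor_one_even (x : Int) (hx : 0 ≤ x) : Int.lor 1 (2 * x) = 2 * x + 1 := by
  obtain ⟨k, rfl⟩ := Int.eq_ofNat_of_zero_le hx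
  have h : Int.lor ((1 : Nat) : Int) ((2 * k : Nat) : Int) = ((1 ||| 2 * k : Nat) : Int) := rfl
  push_cast [pv_nat_one_lor_even] at h
  simpa using h

def pvSum (j cn : Nat) : Int := ((List.range j).map (fun k => (2:Int) ^ (k * cn))).sum

theorem pvSum_nonneg (j cn : Nat) : 0 ≤ pvSum j cn := by
  apply List.sum_nonneg
  intro x hx
  simp only [List.mem_map] at hx
  obtain ⟨k, _, rfl⟩ := hx
  positivity

theorem pvSum_succ (j cn : Nat) : pvSum (j+1) cn = 1 + pvSum j cn * 2 ^ cn := by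
  rw [pvSum, List.range_succ_eq_map, List.map_cons, List.map_map, List.sum_cons]
  have h : (List.range j).map ((fun k => (2:Int) ^ (k * cn)) ∘ Nat.succ)
      = (List.range j).map (fun k => (2:Int) ^ (k * cn) * 2 ^ cn) := by
    apply List.map_congr_left
    intro r _
    simp only [Function.comp_apply]
    rw [← pow_add]
    congr 1
    simp [Nat.succ_eq_add_one]
    ring
  rw [h, List.sum_map_mul_right]
  simp [pvSum]

theorem pv_base_iter (cn : Nat) (hcn : 1 ≤ cn) : ∀ (j : Nat),
    (fun m => Int.lor 1 (m * 2 ^ cn))^[j] 1 = pvSum (j+1) cn := by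
  obtain ⟨c, rfl⟩ : ∃ c, cn = c + 1 := ⟨cn - 1, by omega⟩
  intro j
  induction j with
  | zero => simp [pvSum]
  | succ j ih =>
    rw [Function.iterate_succ_apply', ih]
    show Int.lor 1 (pvSum (j+1) (c+1) * 2 ^ (c+1)) = pvSum (j+1+1) (c+1)
    have h2 : ∀ x : Int, x * 2 ^ (c+1) = 2 * (x * 2 ^ c) := fun x => by rw [pow_succ]; ring
    have hnn : 0 ≤ pvSum (j+1) (c+1) * 2 ^ c :=
      mul_nonneg (pvSum_nonneg _ _) (by positivity)
    rw [h2, pv_int_lor_one_even _ hnn, ← h2, pvSum_succ (j+1)]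
    ring

-- one column's emitted masks, starting from mask
def pvEmit (cn M : Nat) (mask : Int) : List Int :=
  (List.range (M+1)).map (fun r => mask * 2 ^ (r * cn))

theorem pvEmit_succ (cn M : Nat) (mask : Int) :
    pvEmit cn (M+1) mask = mask :: pvEmit cn M (mask * 2 ^ cn) := by
  simp only [pvEmit]
  rw [List.range_succ_eq_map, List.map_cons, List.map_map]
  congr 1
  · simp
  · apply List.map_congr_left
    intro r _
    simp only [Function.comp_apply]
    rw [mul_assoc, ← pow_add]
    congr 2
    rw [Nat.succ_eq_add_one]
    ring

theorem pv_inner_iter (cn M : Nat) : ∀ (acc : List Int) (mask : Int),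
    (fun (s : List Int × Int) => (s.1 ++ [s.2 * 2 ^ cn], s.2 * 2 ^ cn))^[M] (acc ++ [mask], mask)
      = (acc ++ pvEmit cn M mask, mask * 2 ^ (M * cn)) := by
  induction M with
  | zero =>
    intro acc mask
    simp [pvEmit]
  | succ M ih =>
    intro acc mask
    rw [Function.iterate_succ_apply]
    dsimp only
    rw [ih (acc ++ [mask]) (mask * 2 ^ cn), pvEmit_succ]
    refine Prod.ext ?_ ?_
    · simp
    · simp only
      rw [mul_assoc, ← pow_add]
      congr 2
      ring

theorem pv_outer_iter (cn M : Nat) : ∀ (n : Nat) (acc : List Int) (mask : Int),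
    (fun (st : List Int × Int) => (st.1 ++ pvEmit cn M st.2, st.2 * 2 ^ (M * cn) * 2))^[n] (acc, mask)
      = (acc ++ (List.range n).flatMap (fun c => pvEmit cn M (mask * (2 ^ (M * cn + 1)) ^ c)),
         mask * (2 ^ (M * cn + 1)) ^ n) := by
  intro n
  induction n with
  | zero =>
    intro acc mask
    simp
  | succ n ih =>
    intro acc mask
    rw [Function.iterate_succ_apply]
    dsimp only
    rw [ih (acc ++ pvEmit cn M mask) (mask * 2 ^ (M * cn) * 2)]
    refine Prod.ext ?_ ?_
    · simp only [List.range_succ_eq_map, List.flatMap_cons, List.flatMap_map, pow_zero, mul_one,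
        List.append_assoc]
      congr 2
      congr 1
      funext c
      congr 1
      simp only [Nat.succ_eq_add_one, pow_succ]
      ring
    · simp only [pow_succ]
      ring

theorem pvShl_natCast (x : Int) (k : Nat) : pvShl x (k : Int) = x * 2 ^ k := by
  simp [pvShl]

theorem pv_A_eq (to_win rows : Int) (cn : Nat) (hcn : 1 ≤ cn) :
    generate_column_masks to_win rows (cn : Int)
      = (List.range cn).flatMap (fun c =>
          pvEmit cn ((rows - to_win).toNat)
            (pvSum ((to_win - 1).toNat + 1) cn
              * (2 ^ ((rows - to_win).toNat * cn + 1)) ^ c)) := by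
  simp only [generate_column_masks, pvShl, Int.toNat_natCast, Int.toNat_one, pow_one,
    pv_foldl_const, PySem.List.length_pyRange_one, sub_zero, pv_inner_iter,
    pv_base_iter cn hcn, pv_outer_iter, List.nil_append]

theorem pv_B_eq (to_win rows : Int) (cn : Nat) :
    generate_column_masks_alt to_win rows (cn : Int)
      = (List.range cn).flatMap (fun c =>
          (List.range ((rows - to_win).toNat + 1)).map
            (fun r => pvSum ((to_win - 1).toNat + 1) cn
              * 2 ^ (c * ((rows - to_win).toNat * cn + 1) + r * cn))) := by
  have hmax1 : max to_win 1 = (((to_win - 1).toNat + 1 : Nat) : Int) := by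
    push_cast
    omega
  have hmaxm : max (rows - to_win) 0 = (((rows - to_win).toNat : Nat) : Int) := by
    omega
  have hm1 : (((rows - to_win).toNat : Nat) : Int) + 1 = (((rows - to_win).toNat + 1 : Nat) : Int) := by
    push_cast
    ring
  have hb : ∀ k : Nat, pvShl 1 ((k : Int) * (cn : Int)) = (2:Int) ^ (k * cn) := by
    intro k
    rw [show ((k : Int) * (cn : Int)) = ((k * cn : Nat) : Int) by push_cast; ring,
      pvShl_natCast, one_mul]
  have ht : ∀ (x : Int) (c r : Nat),
      pvShl x ((c : Int) * ((((rows - to_win).toNat : Nat) : Int) * (cn : Int) + 1) + (r : Int) * (cn : Int))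
        = x * 2 ^ (c * ((rows - to_win).toNat * cn + 1) + r * cn) := by
    intro x c r
    rw [show ((c : Int) * ((((rows - to_win).toNat : Nat) : Int) * (cn : Int) + 1) + (r : Int) * (cn : Int))
        = ((c * ((rows - to_win).toNat * cn + 1) + r * cn : Nat) : Int) by push_cast; ring,
      pvShl_natCast]
  simp only [generate_column_masks_alt, hmax1, hmaxm, hm1, PySem.List.pyRange_zero_natCast,
    List.flatMap_map, List.map_map, Function.comp_def, hb, ht, pvSum]

-- ===== VERDICT (by name: the statement is the Claim_ definition above) =====
theorem generate_column_masks_spec : Claim_equal_generate_column_masks := by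
  intro to_win rows columns _ _
  unfold Spec_generate_column_masks
  by_cases hc : columns ≤ 0
  · have h1 : PySem.List.pyRange 0 columns 1 = [] := PySem.List.pyRange_one_eq_nil (by omega)
    simp [generate_column_masks, generate_column_masks_alt, h1]
  · obtain ⟨cn, rfl⟩ : ∃ cn : Nat, columns = (cn : Int) := ⟨columns.toNat, by omega⟩
    have hcn : 1 ≤ cn := by omega
    rw [pv_A_eq to_win rows cn hcn, pv_B_eq to_win rows cn]
    congr 1
    funext c
    rw [pvEmit]
    apply List.map_congr_left
    intro r _
    rw [← pow_mul, mul_assoc, ← pow_add]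
    congr 2
    ring
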